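-- pv_equiv track=rewrite | github.com/ximenasolis-dot/Dise-o-y-analisis-de-algoritmos-1558 | ProyectoFinal-Ejercicio1/existe_camino.py | existe_camino_pd
-- ===== SOURCE A (Python) =====
-- def existe_camino_pd(n, m):
--     """
--     Determina si existe un camino desde (0, 0) hasta (n-1, m-1)
--     usando Programación Dinámica
--     n: número de filas, m: número de columnas
--     """
--     if n <= 0 or m <= 0:
--         return False
--     # Inici la tabla DP de tamaño n x m
--     # dp[i][j] será True si (i, j) es alcanzable
--     dp = [[False] * m for _ in range(n)]
--     dp[0][0] = True
--
--     # recorre la tabla de arriba a abajo y de izquierda a derecha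
--     for i in range(n):
--         for j in range(m):
--             # comprueba si se puede llegar desde 'tres a la izquierda'
--             if j >= 3:
--                 # Si dp[i][j-3] es True, entonces dp[i][j] también lo es
--                 if dp[i][j - 3]:
--                     dp[i][j] = True
--
--             # comprueba si se puede llegar desde 'dos hacia arriba'
--             if i >= 2:
--                 # Si dp[i-2][j] es True, entonces dp[i][j] también lo es
--                 if dp[i - 2][j]:
--                     dp[i][j] = True
--
--     # El resultado final está en la casilla destino
--     return dp[n - 1][m - 1]
-- ===== SOURCE B (Python) =====
-- def existe_camino_pd(n, m):
--     # Closed form: only moves are +3 columns and +2 rows, so (n-1, m-1) is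
--     # reachable from (0, 0) iff n-1 is a multiple of 2 and m-1 a multiple of 3.
--     return n > 0 and m > 0 and (n - 1) % 2 == 0 and (m - 1) % 3 == 0
-- ===== Notes on version B (the rewrite author's own statement) =====
-- stated objective: faster
-- what changed: Replaces the O(n*m) DP table with the closed form n>0 and m>0 and (n-1)%2==0 and (m-1)%3==0, since the only moves are +2 rows and +3 columns.
import Mathlib
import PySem

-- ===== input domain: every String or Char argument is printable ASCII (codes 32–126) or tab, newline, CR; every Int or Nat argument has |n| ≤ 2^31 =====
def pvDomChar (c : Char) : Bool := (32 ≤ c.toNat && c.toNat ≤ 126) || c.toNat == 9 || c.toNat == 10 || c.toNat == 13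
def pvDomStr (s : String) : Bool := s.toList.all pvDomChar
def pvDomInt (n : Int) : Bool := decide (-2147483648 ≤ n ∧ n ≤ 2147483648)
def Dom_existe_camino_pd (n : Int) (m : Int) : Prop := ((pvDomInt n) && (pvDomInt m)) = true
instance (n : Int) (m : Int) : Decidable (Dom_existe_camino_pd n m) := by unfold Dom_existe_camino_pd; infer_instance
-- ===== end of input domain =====

-- B replaces A's O(n*m) DP table with the O(1) closed form
-- n>0 and m>0 and (n-1)%2==0 and (m-1)%3==0 (the moves are +2 rows / +3 columns).

-- ===== PORT A =====
-- dp[a][b] read / write on the list-of-lists table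
def pvGetCell (dp : List (List Bool)) (a b : Nat) : Bool := (dp.getD a []).getD b false

def pvSetCell (dp : List (List Bool)) (a b : Nat) (v : Bool) : List (List Bool) :=
  dp.set a ((dp.getD a []).set b v)

-- body of A's inner loop for cell (i, j): the two conditional `dp[i][j] = True` writes
def pvStepA (dp : List (List Bool)) (i j : Nat) : List (List Bool) :=
  let dp1 := if 3 ≤ j then (if pvGetCell dp i (j - 3) then pvSetCell dp i j true else dp) else dp
  if 2 ≤ i then (if pvGetCell dp1 (i - 2) j then pvSetCell dp1 i j true else dp1) else dp1

def existe_camino_pd (n : Int) (m : Int) : Bool :=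
  if n ≤ 0 ∨ m ≤ 0 then false
  else
    -- table: dp = [[False] * m for _ in range(n)]; dp[0][0] = True;
    -- loops: for i in range(n): for j in range(m): (the two conditional writes = pvStepA);
    -- result: dp[n - 1][m - 1]
    pvGetCell
      ((List.range n.toNat).foldl
        (fun dp i => (List.range m.toNat).foldl (fun dp j => pvStepA dp i j) dp)
        (pvSetCell ((List.range n.toNat).map (fun _ => List.replicate m.toNat false)) 0 0 true))
      (n.toNat - 1) (m.toNat - 1)

-- ===== PORT B =====
def existe_camino_pd_alt (n : Int) (m : Int) : Bool :=
  decide (0 < n) && decide (0 < m) &&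
    decide (PySem.Int.mod (n - 1) 2 = 0) && decide (PySem.Int.mod (m - 1) 3 = 0)

-- ===== PRECONDITION & SPEC =====
def Spec_existe_camino_pd (n : Int) (m : Int) (out : Bool) : Prop := out = existe_camino_pd_alt n m
instance (n : Int) (m : Int) (out : Bool) : Decidable (Spec_existe_camino_pd n m out) := by unfold Spec_existe_camino_pd; infer_instance

-- ===== CLAIM (what is proved, stated in full; the proofs are below) =====
def Claim_equal_existe_camino_pd : Prop := ∀ (n : Int) (m : Int), Dom_existe_camino_pd n m → Spec_existe_camino_pd n m (existe_camino_pd n m)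

-- ===== LEMMAS AND PROOFS =====

-- the value A's table converges to at cell (a, b)
def pvReach (a b : Nat) : Bool := decide (a % 2 = 0) && decide (b % 3 = 0)

-- table shape
def pvShape (N M : Nat) (dp : List (List Bool)) : Prop :=
  dp.length = N ∧ ∀ r ∈ dp, r.length = M

-- contents invariant while processing: rows < i done, row i done up to col j
def pvInv (N M : Nat) (dp : List (List Bool)) (i j : Nat) : Prop :=
  pvShape N M dp ∧
  ∀ a b, a < N → b < M →
    pvGetCell dp a b = if (a < i ∨ (a = i ∧ b < j)) ∨ (a = 0 ∧ b = 0) then pvReach a b else false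

-- "dp' is dp with (i,j) OR-ed with v": what one conditional write produces
def pvEvolves (N M i j : Nat) (dp dp' : List (List Bool)) (v : Bool) : Prop :=
  pvShape N M dp' ∧
  (∀ a b, ¬(a = i ∧ b = j) → pvGetCell dp' a b = pvGetCell dp a b) ∧
  pvGetCell dp' i j = (pvGetCell dp i j || v)

theorem pvRowlen (N M : Nat) (dp : List (List Bool)) (h : pvShape N M dp) (a : Nat) (ha : a < N) :
    (dp.getD a []).length = M := by
  obtain ⟨h1, h2⟩ := h
  have hlt : a < dp.length := by omega
  simp [List.getD, List.getElem?_eq_getElem hlt]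
  exact h2 _ (List.getElem_mem hlt)

theorem pvGetCell_set_self (dp : List (List Bool)) (a b : Nat) (v : Bool)
    (ha : a < dp.length) (hb : b < (dp.getD a []).length) :
    pvGetCell (pvSetCell dp a b v) a b = v := by
  have hb' : b < dp[a].length := by
    simpa [List.getD, List.getElem?_eq_getElem ha] using hb
  simp [pvGetCell, pvSetCell, List.getD, ha, List.getElem?_eq_getElem ha,
    List.getElem?_set_self, hb']

theorem pvGetCell_set_ne (dp : List (List Bool)) (a b a' b' : Nat) (v : Bool)
    (h : ¬(a' = a ∧ b' = b)) :
    pvGetCell (pvSetCell dp a b v) a' b' = pvGetCell dp a' b' := by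
  unfold pvGetCell pvSetCell
  by_cases hae : a' = a
  · subst hae
    have hb : b' ≠ b := fun hb => h ⟨rfl, hb⟩
    by_cases hlt : a' < dp.length
    · simp [List.getD, hlt, List.getElem?_eq_getElem hlt,
        List.getElem?_set_ne (Ne.symm hb)]
    · simp [List.getD, hlt]
  · simp [List.getD, List.getElem?_set_ne (Ne.symm hae)]

theorem pvSetCell_shape (N M : Nat) (dp : List (List Bool)) (a b : Nat) (v : Bool)
    (h : pvShape N M dp) (ha : a < N) : pvShape N M (pvSetCell dp a b v) := by
  obtain ⟨h1, h2⟩ := h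
  refine ⟨by simp [pvSetCell, h1], ?_⟩
  intro r hr
  rcases List.mem_or_eq_of_mem_set hr with h' | h'
  · exact h2 r h'
  · subst h'
    rw [List.length_set]
    exact pvRowlen N M dp ⟨h1, h2⟩ a ha

theorem pvEvolves_write (N M i j : Nat) (dp : List (List Bool))
    (hsh : pvShape N M dp) (hi : i < N) (hj : j < M) :
    pvEvolves N M i j dp (pvSetCell dp i j true) true := by
  have hlen : i < dp.length := by have := hsh.1; omega
  have hrow : j < (dp.getD i []).length := by rw [pvRowlen N M dp hsh i hi]; omega
  refine ⟨pvSetCell_shape N M dp i j true hsh hi, ?_, ?_⟩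
  · intro a b hab; exact pvGetCell_set_ne dp i j a b true hab
  · rw [pvGetCell_set_self dp i j true hlen hrow]; simp

theorem pvEvolves_id (N M i j : Nat) (dp : List (List Bool)) (hsh : pvShape N M dp) :
    pvEvolves N M i j dp dp false := ⟨hsh, fun _ _ _ => rfl, by simp⟩

-- the two conditional writes of A's loop body, as one pvEvolves fact
theorem pvStepA_evolves (N M i j : Nat) (dp : List (List Bool))
    (hsh : pvShape N M dp) (hi : i < N) (hj : j < M) :
    pvEvolves N M i j dp (pvStepA dp i j)
      ((decide (3 ≤ j) && pvGetCell dp i (j - 3)) || (decide (2 ≤ i) && pvGetCell dp (i - 2) j)) := by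
  unfold pvStepA
  have ev1 : pvEvolves N M i j dp
      (if 3 ≤ j then (if pvGetCell dp i (j - 3) then pvSetCell dp i j true else dp) else dp)
      (decide (3 ≤ j) && pvGetCell dp i (j - 3)) := by
    by_cases h3 : 3 ≤ j
    · by_cases hg : pvGetCell dp i (j - 3)
      · simpa [h3, hg] using pvEvolves_write N M i j dp hsh hi hj
      · simpa [h3, hg] using pvEvolves_id N M i j dp hsh
    · simpa [h3] using pvEvolves_id N M i j dp hsh
  set dp1 := (if 3 ≤ j then (if pvGetCell dp i (j - 3) then pvSetCell dp i j true else dp) else dp)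
  obtain ⟨hsh1, hoff1, hat1⟩ := ev1
  -- the second read sees dp's value whenever it matters (2 ≤ i → (i-2, j) ≠ (i, j))
  have hread : (decide (2 ≤ i) && pvGetCell dp1 (i - 2) j)
      = (decide (2 ≤ i) && pvGetCell dp (i - 2) j) := by
    by_cases h2 : 2 ≤ i
    · rw [hoff1 (i - 2) j (by omega)]
    · simp [h2]
  have ev2 : pvEvolves N M i j dp1
      (if 2 ≤ i then (if pvGetCell dp1 (i - 2) j then pvSetCell dp1 i j true else dp1) else dp1)
      (decide (2 ≤ i) && pvGetCell dp1 (i - 2) j) := by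
    by_cases h2 : 2 ≤ i
    · by_cases hg : pvGetCell dp1 (i - 2) j
      · simpa [h2, hg] using pvEvolves_write N M i j dp1 hsh1 hi hj
      · simpa [h2, hg] using pvEvolves_id N M i j dp1 hsh1
    · simpa [h2] using pvEvolves_id N M i j dp1 hsh1
  obtain ⟨hsh2, hoff2, hat2⟩ := ev2
  refine ⟨hsh2, ?_, ?_⟩
  · intro a b hab; rw [hoff2 a b hab, hoff1 a b hab]
  · rw [hat2, hat1, hread, Bool.or_assoc]

-- arithmetic core: the recurrence value equals pvReach
theorem pvReach_rec (i j : Nat) :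
    ((if (i = 0 ∧ j = 0) then pvReach i j else false)
      || (decide (3 ≤ j) && pvReach i (j - 3))
      || (decide (2 ≤ i) && pvReach (i - 2) j)) = pvReach i j := by
  by_cases h3 : 3 ≤ j
  · rw [if_neg (by omega), decide_eq_true h3]
    have e3 : pvReach i (j - 3) = pvReach i j := by
      unfold pvReach; rw [(by omega : (j - 3) % 3 = j % 3)]
    by_cases h2 : 2 ≤ i
    · rw [decide_eq_true h2]
      have e2 : pvReach (i - 2) j = pvReach i j := by
        unfold pvReach; rw [(by omega : (i - 2) % 2 = i % 2)]
      rw [e3, e2]; simp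
    · rw [decide_eq_false h2, e3]; simp
  · rw [decide_eq_false h3]
    by_cases h2 : 2 ≤ i
    · rw [decide_eq_true h2, if_neg (by omega)]
      have e2 : pvReach (i - 2) j = pvReach i j := by
        unfold pvReach; rw [(by omega : (i - 2) % 2 = i % 2)]
      rw [e2]; simp
    · have hi : i < 2 := by omega
      have hj : j < 3 := by omega
      rw [decide_eq_false h2]
      interval_cases i <;> interval_cases j <;> simp [pvReach]

-- one inner-loop step preserves the invariant
theorem pvInv_step (N M : Nat) (dp : List (List Bool)) (i j : Nat)
    (hi : i < N) (hj : j < M) (h : pvInv N M dp i j) : pvInv N M (pvStepA dp i j) i (j + 1) := by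
  obtain ⟨hsh, hget⟩ := h
  obtain ⟨hsh', hoff, hat⟩ := pvStepA_evolves N M i j dp hsh hi hj
  refine ⟨hsh', ?_⟩
  intro a b ha hb
  by_cases hab : a = i ∧ b = j
  · obtain ⟨ha', hb'⟩ := hab; subst ha'; subst hb'
    rw [hat]
    have e0 : pvGetCell dp a b = (if (a = 0 ∧ b = 0) then pvReach a b else false) := by
      rw [hget a b ha hb]; exact if_congr (by omega) rfl rfl
    have e1 : (decide (3 ≤ b) && pvGetCell dp a (b - 3)) = (decide (3 ≤ b) && pvReach a (b - 3)) := by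
      by_cases h3 : 3 ≤ b
      · rw [hget a (b - 3) ha (by omega), if_pos (by omega)]
      · simp [h3]
    have e2 : (decide (2 ≤ a) && pvGetCell dp (a - 2) b) = (decide (2 ≤ a) && pvReach (a - 2) b) := by
      by_cases h2 : 2 ≤ a
      · rw [hget (a - 2) b (by omega) hb, if_pos (by omega)]
      · simp [h2]
    rw [e0, e1, e2, ← Bool.or_assoc, pvReach_rec, if_pos (by omega)]
  · rw [hoff a b hab, hget a b ha hb]
    exact if_congr (by omega) rfl rfl

-- inner loop over the remaining columns
theorem pvInv_inner (N M i : Nat) (hi : i < N) :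
    ∀ (k j0 : Nat) (dp : List (List Bool)), j0 + k = M → pvInv N M dp i j0 →
      pvInv N M ((List.range' j0 k).foldl (fun dp j => pvStepA dp i j) dp) i M := by
  intro k
  induction k with
  | zero =>
      intro j0 dp hjk h
      obtain rfl : j0 = M := by omega
      simpa using h
  | succ k ih =>
      intro j0 dp hjk h
      rw [List.range'_succ, List.foldl_cons]
      exact ih (j0 + 1) _ (by omega) (pvInv_step N M dp i j0 hi (by omega) h)

-- end of a row restarts the invariant at the next row
theorem pvInv_next_row (N M i : Nat) (dp : List (List Bool)) (h : pvInv N M dp i M) :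
    pvInv N M dp (i + 1) 0 := by
  obtain ⟨hsh, hget⟩ := h
  refine ⟨hsh, fun a b ha hb => ?_⟩
  rw [hget a b ha hb]
  exact if_congr (by omega) rfl rfl

-- outer loop over the remaining rows
theorem pvInv_outer (N M : Nat) :
    ∀ (k i0 : Nat) (dp : List (List Bool)), i0 + k = N → pvInv N M dp i0 0 →
      pvInv N M ((List.range' i0 k).foldl
        (fun dp i => (List.range M).foldl (fun dp j => pvStepA dp i j) dp) dp) N 0 := by
  intro k
  induction k with
  | zero =>
      intro i0 dp hik h
      obtain rfl : i0 = N := by omega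
      simpa using h
  | succ k ih =>
      intro i0 dp hik h
      rw [List.range'_succ, List.foldl_cons]
      refine ih (i0 + 1) _ (by omega) ?_
      rw [List.range_eq_range']
      exact pvInv_next_row N M i0 _ (pvInv_inner N M i0 (by omega) M 0 _ (by omega) h)

-- the initial table satisfies the invariant at (0, 0)
theorem pvInv_init (N M : Nat) (hN : 0 < N) (hM : 0 < M) :
    pvInv N M (pvSetCell ((List.range N).map (fun _ => List.replicate M false)) 0 0 true) 0 0 := by
  set dp0 := (List.range N).map (fun _ => List.replicate M false) with hdp0
  have hsh0 : pvShape N M dp0 := by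
    refine ⟨by simp [hdp0], ?_⟩
    intro r hr
    rw [hdp0, List.mem_map] at hr
    obtain ⟨x, _, hx⟩ := hr
    rw [← hx]
    simp
  have hget0 : ∀ a b, a < N → b < M → pvGetCell dp0 a b = false := by
    intro a b ha hb
    have hlt : a < dp0.length := by have := hsh0.1; omega
    simp [pvGetCell, List.getD, hdp0, List.getElem?_replicate, ha, hb]
  refine ⟨pvSetCell_shape N M dp0 0 0 true hsh0 hN, ?_⟩
  intro a b ha hb
  by_cases hab : a = 0 ∧ b = 0
  · obtain ⟨ha', hb'⟩ := hab; subst ha'; subst hb'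
    rw [pvGetCell_set_self dp0 0 0 true (by have := hsh0.1; omega)
      (by rw [pvRowlen N M dp0 hsh0 0 hN]; omega)]
    rw [if_pos (by omega)]
    decide
  · rw [pvGetCell_set_ne dp0 0 0 a b true hab, hget0 a b ha hb, if_neg (by omega)]

-- A computes pvReach at the target cell whenever n, m > 0
theorem existe_camino_pd_pos (n m : Int) (hn : 0 < n) (hm : 0 < m) :
    existe_camino_pd n m = pvReach (n.toNat - 1) (m.toNat - 1) := by
  unfold existe_camino_pd
  rw [if_neg (by omega)]
  have hN : 0 < n.toNat := by omega
  have hM : 0 < m.toNat := by omega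
  have hfin := pvInv_outer n.toNat m.toNat n.toNat 0 _ (by omega) (pvInv_init _ _ hN hM)
  rw [← List.range_eq_range'] at hfin
  rw [hfin.2 (n.toNat - 1) (m.toNat - 1) (by omega) (by omega), if_pos (by omega)]

-- ===== VERDICT (by name: the statement is the Claim_ definition above) =====
theorem existe_camino_pd_spec : Claim_equal_existe_camino_pd := by
  intro n m _
  unfold Spec_existe_camino_pd existe_camino_pd_alt
  by_cases hn : 0 < n
  · by_cases hm : 0 < m
    · rw [existe_camino_pd_pos n m hn hm,
        PySem.Int.mod_eq_emod_of_pos (show (0:Int) < 2 by norm_num),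
        PySem.Int.mod_eq_emod_of_pos (show (0:Int) < 3 by norm_num)]
      unfold pvReach
      rw [decide_eq_true hn, decide_eq_true hm]
      simp only [Bool.true_and]
      rw [decide_eq_decide.mpr (by omega : (n.toNat - 1) % 2 = 0 ↔ (n - 1) % 2 = 0),
        decide_eq_decide.mpr (by omega : (m.toNat - 1) % 3 = 0 ↔ (m - 1) % 3 = 0)]
    · unfold existe_camino_pd
      rw [if_pos (by omega)]
      simp [hm]
  · unfold existe_camino_pd
    rw [if_pos (by omega)]
    simp [hn]
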